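-- pv_equiv track=rewrite | github.com/Discovery-IDRs/predIDR | src/models/features.py | get_repeat_count
-- ===== SOURCE A (Python) =====
-- def get_repeat_count(seq):
--     """Return count of symbols in seq which appear two or more times in a row.
--
--     Parameters
--     ----------
--         seq : string
--             Protein sequence as string.
--
--     Returns
--     -------
--         repeat_count : int
--             Count of repeat symbols in seq.
--     """
--     if len(seq) <= 1:
--         return 0
--
--     # Count terminal symbols
--     repeat_count = 0
--     if seq[0] == seq[1]:
--         repeat_count += 1
--     if seq[len(seq) - 1] == seq[len(seq) - 2]:
--         repeat_count += 1
--
--     # Count interior symbols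
--     if len(seq) > 2:
--         for i in range(1, len(seq) - 1):
--             if seq[i] == seq[i-1]:
--                 repeat_count += 1
--             elif seq[i] == seq[i+1]:
--                 repeat_count += 1
--
--     return repeat_count
-- ===== SOURCE B (Python) =====
-- def get_repeat_count(seq):
--     """Return count of symbols in seq which appear two or more times in a row."""
--     total = 0
--     i = 0
--     n = len(seq)
--     while i < n:
--         j = i
--         while j < n and seq[j] == seq[i]:
--             j += 1
--         if j - i >= 2:
--             total += j - i
--         i = j
--     return total
-- ===== Notes on version B (the rewrite author's own statement) =====
-- stated objective: simpler
-- what changed: Replaced A's three-part index scan (special-cased first/last symbol plus an interior loop testing both neighbours) by a single run-length scan that splits seq into maximal runs of equal symbols and adds each run's length when it is at least 2.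
import Mathlib
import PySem

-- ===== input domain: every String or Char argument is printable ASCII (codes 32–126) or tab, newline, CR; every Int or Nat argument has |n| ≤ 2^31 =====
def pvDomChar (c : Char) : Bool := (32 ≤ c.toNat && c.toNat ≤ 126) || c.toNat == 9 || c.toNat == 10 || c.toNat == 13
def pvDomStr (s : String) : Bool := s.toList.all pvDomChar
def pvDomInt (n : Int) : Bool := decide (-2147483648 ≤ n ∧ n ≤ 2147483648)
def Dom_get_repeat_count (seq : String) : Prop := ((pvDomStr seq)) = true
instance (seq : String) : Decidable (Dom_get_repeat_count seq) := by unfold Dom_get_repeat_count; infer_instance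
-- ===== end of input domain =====

-- B replaces A's index scan (first/last symbols special-cased, interior loop testing both
-- neighbours) by a single run-length scan adding each maximal run's length when it is ≥ 2;
-- objective: simpler.

-- ===== PORT A =====
def get_repeat_count (seq : String) : Int :=
  let cs := seq.toList
  let n : Int := PySem.Str.len seq
  if n ≤ 1 then 0
  else
    let repeat_count : Int := 0
    let repeat_count := if PySem.List.pyGet? cs 0 = PySem.List.pyGet? cs 1 then repeat_count + 1 else repeat_count
    let repeat_count := if PySem.List.pyGet? cs (n - 1) = PySem.List.pyGet? cs (n - 2) then repeat_count + 1 else repeat_count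
    if n > 2 then
      (PySem.List.pyRange 1 (n - 1) 1).foldl
        (fun rc i =>
          if PySem.List.pyGet? cs i = PySem.List.pyGet? cs (i - 1) then rc + 1
          else if PySem.List.pyGet? cs i = PySem.List.pyGet? cs (i + 1) then rc + 1
          else rc) repeat_count
    else repeat_count

-- ===== PORT B =====
-- B-side helper: the run-length scan of Source B (outer while loop = one maximal run per step).
def altGo : List Char → Int
  | [] => 0
  | c :: rest =>
    let run := rest.takeWhile (· == c)
    let post := rest.dropWhile (· == c)
    (if run.length + 1 ≥ 2 then ((run.length : Int) + 1) else 0) + altGo post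
termination_by l => l.length
decreasing_by
  simpa using Nat.lt_succ_of_le (List.length_dropWhile_le _ _)

def get_repeat_count_alt (seq : String) : Int := altGo seq.toList

-- ===== PRECONDITION & SPEC =====
def Spec_get_repeat_count (seq : String) (out : Int) : Prop := out = get_repeat_count_alt seq
instance (seq : String) (out : Int) : Decidable (Spec_get_repeat_count seq out) := by unfold Spec_get_repeat_count; infer_instance

-- ===== CLAIM (what is proved, stated in full; the proofs are below) =====
def Claim_equal_get_repeat_count : Prop := ∀ (seq : String), Dom_get_repeat_count seq → Spec_get_repeat_count seq (get_repeat_count seq)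

-- ===== LEMMAS AND PROOFS =====

-- a character counts iff it equals its predecessor (`p`) or its successor; `go` walks the
-- list carrying the previous character, summing these indicators — the common spec.
def go : Option Char → List Char → Int
  | _, [] => 0
  | p, [x] => if some x = p then 1 else 0
  | p, x :: y :: rest => (if some x = p ∨ x = y then 1 else 0) + go (some x) (y :: rest)

-- A's interior-loop indicator, on Nat indices (element k+1 against its two neighbours)
def indN (cs : List Char) (k : Nat) : Int :=
  if cs[k+1]? = cs[k]? then 1 else if cs[k+1]? = cs[k+2]? then 1 else 0

def lastInd (cs : List Char) : Int :=
  if cs[cs.length-1]? = cs[cs.length-2]? then 1 else 0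

lemma foldl_if_sum {α : Type} (P Q : α → Prop) [DecidablePred P] [DecidablePred Q]
    (l : List α) (init : Int) :
    l.foldl (fun rc i => if P i then rc + 1 else if Q i then rc + 1 else rc) init
      = init + (l.map (fun i => if P i then (1:Int) else if Q i then 1 else 0)).sum := by
  induction l generalizing init with
  | nil => simp
  | cons x l ih => simp only [List.foldl_cons, List.map_cons, List.sum_cons, ih]; split_ifs <;> ring

lemma go_none_of_ne {p c : Char} (h : p ≠ c) (cs : List Char) :
    go (some p) (c :: cs) = go none (c :: cs) := by
  cases cs <;> simp [go, Ne.symm h]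

lemma go_replicate (rest : List Char) (c : Char)
    (h : rest = [] ∨ rest.head? ≠ some c) :
    ∀ k : Nat, go (some c) (List.replicate k c ++ rest) = k + go none rest := by
  intro k
  induction k with
  | zero =>
    rcases h with h | h
    · simp [h, go]
    · cases rest with
      | nil => simp [go]
      | cons x t =>
        have hx : c ≠ x := by simp at h; exact fun e => h e.symm
        simpa using go_none_of_ne hx t
  | succ k ih =>
    rcases hK : List.replicate k c ++ rest with _ | ⟨x, t⟩
    · have hk : k = 0 := by
        cases k with
        | zero => rfl
        | succ m => simp [List.replicate_succ] at hK
      have hr : rest = [] := by simpa [hk] using hK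
      simp [hk, hr, go, List.replicate_succ]
    · have : go (some c) (List.replicate (k+1) c ++ rest)
          = 1 + go (some c) (List.replicate k c ++ rest) := by
        rw [List.replicate_succ, List.cons_append, hK]
        simp [go]
      rw [this, ih]
      push_cast
      ring

lemma go_run (c : Char) (m : Nat) (post : List Char)
    (h : post = [] ∨ post.head? ≠ some c) :
    go none (List.replicate (m+1) c ++ post)
      = (if m + 1 ≥ 2 then ((m : Int) + 1) else 0) + go none post := by
  cases m with
  | zero =>
    rcases h with h | h
    · simp [h, go]
    · cases post with
      | nil => simp [go]
      | cons x t =>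
        have hx : c ≠ x := by simp at h; exact fun e => h e.symm
        simp only [List.replicate_succ, List.replicate_zero, List.nil_append, List.cons_append]
        simp [go, hx, go_none_of_ne hx t]
  | succ m =>
    have : go none (List.replicate (m+2) c ++ post)
        = 1 + go (some c) (List.replicate (m+1) c ++ post) := by
      simp [List.replicate_succ, go]
    rw [this, go_replicate post c h]
    push_cast
    split_ifs with hm
    · ring
    · omega

lemma altGo_eq_go : ∀ cs : List Char, altGo cs = go none cs := by
  intro cs
  induction cs using altGo.induct with
  | case1 => simp [altGo, go]
  | case2 c rest post ih =>
    have hpost : post = rest.dropWhile (· == c) := rfl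
    set run := rest.takeWhile (· == c) with hrun
    have hrep : run = List.replicate run.length c := by
      apply List.eq_replicate_of_mem
      intro b hb
      have := List.mem_takeWhile_imp (hrun ▸ hb)
      simpa using this
    have hsplit : rest = run ++ post := by
      rw [hrun, hpost, List.takeWhile_append_dropWhile]
    have hhead : post = [] ∨ post.head? ≠ some c := by
      cases hp : post with
      | nil => exact Or.inl rfl
      | cons x t =>
        right
        have hx : ¬ (x == c) := by
          have := List.head?_dropWhile_not (· == c) rest
          rw [← hpost, hp] at this
          simpa using this
        simp at hx
        simp [hx]
    have : altGo (c :: rest)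
        = (if run.length + 1 ≥ 2 then ((run.length : Int) + 1) else 0) + altGo post := by
      rw [altGo]
    rw [this, ih]
    have hcons : c :: rest = List.replicate (run.length + 1) c ++ post := by
      rw [hsplit, List.replicate_succ, List.cons_append, ← hrep]
    rw [hcons, go_run c run.length post hhead]

lemma go_interior : ∀ (t : List Char) (a b : Char),
    go (some a) (b :: t)
      = ((List.range t.length).map (indN (a :: b :: t))).sum + lastInd (a :: b :: t) := by
  intro t
  induction t with
  | nil => intro a b; simp [go, lastInd]
  | cons c t' ih =>
    intro a b
    have hstep : go (some a) (b :: c :: t')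
        = (if some b = some a ∨ b = c then 1 else 0) + go (some b) (c :: t') := by
      simp [go]
    rw [hstep, ih b c]
    have hhead : (if some b = some a ∨ b = c then (1:Int) else 0) = indN (a :: b :: c :: t') 0 := by
      simp only [indN]
      split_ifs with h1 h2 h3 h2 h3 <;> simp_all
    have hshift : ∀ k : Nat, indN (a :: b :: c :: t') (k+1) = indN (b :: c :: t') k := by
      intro k
      simp only [indN, List.getElem?_cons_succ]
      rfl
    have hlast : lastInd (a :: b :: c :: t') = lastInd (b :: c :: t') := by
      simp only [lastInd, List.length_cons]
      have h1 : t'.length + 1 + 1 + 1 - 1 = (t'.length + 1 + 1 - 1) + 1 := by omega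
      have h2 : t'.length + 1 + 1 + 1 - 2 = (t'.length + 1 + 1 - 2) + 1 := by omega
      simp only [h1, h2, List.getElem?_cons_succ]
      rfl
    have hrange : List.range (t'.length + 1) = 0 :: (List.range t'.length).map Nat.succ :=
      List.range_succ_eq_map
    rw [List.length_cons, hrange]
    simp only [List.map_cons, List.map_map, List.sum_cons]
    have hmap : (List.range t'.length).map (indN (a :: b :: c :: t') ∘ Nat.succ)
        = (List.range t'.length).map (indN (b :: c :: t')) := by
      apply List.map_congr_left; intro k _
      simpa using hshift k
    rw [hmap, ← hhead, hlast]
    ring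

lemma indN_eq_ind (cs : List Char) (k : Nat) :
    (if PySem.List.pyGet? cs (1 + (k:Int)) = PySem.List.pyGet? cs ((1 + (k:Int)) - 1) then (1:Int)
     else if PySem.List.pyGet? cs (1 + (k:Int)) = PySem.List.pyGet? cs ((1 + (k:Int)) + 1) then 1
     else 0) = indN cs k := by
  have e1 : (1 + (k:Int)) = ((k+1 : Nat) : Int) := by push_cast; ring
  have e2 : (1 + (k:Int)) - 1 = ((k : Nat) : Int) := by ring
  have e3 : (1 + (k:Int)) + 1 = ((k+2 : Nat) : Int) := by push_cast; ring
  rw [e2, e3, e1]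
  simp only [PySem.List.pyGet?_natCast, indN]

set_option maxHeartbeats 1000000 in
theorem port_eq (seq : String) : get_repeat_count seq = get_repeat_count_alt seq := by
  unfold get_repeat_count get_repeat_count_alt
  rw [altGo_eq_go, PySem.Str.len_eq]
  generalize seq.toList = cs
  dsimp only
  by_cases hn : (cs.length : Int) ≤ 1
  · rw [if_pos hn]
    rcases cs with _ | ⟨a, _ | ⟨b, t⟩⟩
    · simp [go]
    · simp [go]
    · exfalso; simp at hn; omega
  · rw [if_neg hn]
    have hlen : 2 ≤ cs.length := by omega
    rcases cs with _ | ⟨a, cs'⟩; · simp at hlen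
    rcases cs' with _ | ⟨b, t⟩; · simp at hlen
    have hg0 : PySem.List.pyGet? (a :: b :: t) (0:Int) = some a := by
      exact PySem.List.pyGet?_zero_cons _ _
    have hg1 : PySem.List.pyGet? (a :: b :: t) (1:Int) = some b := by
      simp
    have eL1 : ((a :: b :: t).length : Int) - 1 = (((a :: b :: t).length - 1 : Nat) : Int) := by
      omega
    have eL2 : ((a :: b :: t).length : Int) - 2 = (((a :: b :: t).length - 2 : Nat) : Int) := by
      omega
    have hgL1 : PySem.List.pyGet? (a :: b :: t) (((a :: b :: t).length : Int) - 1)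
        = (a :: b :: t)[(a :: b :: t).length - 1]? := by
      rw [eL1]; exact PySem.List.pyGet?_natCast ..
    have hgL2 : PySem.List.pyGet? (a :: b :: t) (((a :: b :: t).length : Int) - 2)
        = (a :: b :: t)[(a :: b :: t).length - 2]? := by
      rw [eL2]; exact PySem.List.pyGet?_natCast ..
    rw [hg0, hg1, hgL1, hgL2]
    have hlastInd : (if (a :: b :: t)[(a :: b :: t).length - 1]?
          = (a :: b :: t)[(a :: b :: t).length - 2]? then (1:Int) else 0)
        = lastInd (a :: b :: t) := by simp [lastInd]
    by_cases h2 : ((a :: b :: t).length : Int) > 2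
    · rw [if_pos h2]
      have hrange : PySem.List.pyRange 1 (((a :: b :: t).length : Int) - 1) 1
          = (List.range t.length).map (fun k : Nat => 1 + (k : Int)) := by
        rw [PySem.List.pyRange_one]
        have hN : ((((a :: b :: t).length : Int) - 1) - 1).toNat = t.length := by
          simp only [List.length_cons]
          omega
        rw [hN]
      rw [hrange,
        foldl_if_sum (fun i => PySem.List.pyGet? (a :: b :: t) i = PySem.List.pyGet? (a :: b :: t) (i - 1))
          (fun i => PySem.List.pyGet? (a :: b :: t) i = PySem.List.pyGet? (a :: b :: t) (i + 1))]
      rw [List.map_map]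
      have hmap : ((List.range t.length).map
          ((fun i => if PySem.List.pyGet? (a :: b :: t) i = PySem.List.pyGet? (a :: b :: t) (i - 1) then (1:Int)
            else if PySem.List.pyGet? (a :: b :: t) i = PySem.List.pyGet? (a :: b :: t) (i + 1) then 1 else 0)
            ∘ (fun k : Nat => 1 + (k : Int))))
          = (List.range t.length).map (indN (a :: b :: t)) := by
        apply List.map_congr_left; intro k _
        simp only [Function.comp_apply]
        exact indN_eq_ind (a :: b :: t) k
      rw [hmap, go, go_interior t a b, ← hlastInd]
      clear hlastInd hmap hrange hg0 hg1 hgL1 hgL2 eL1 eL2 hn hlen h2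
      generalize (List.map (indN (a :: b :: t)) (List.range t.length)).sum = S
      split_ifs <;> first
      | omega
      | (simp_all; try omega)
    · have ht : t = [] := by
        have h3 : (a :: b :: t).length = 2 := by
          have : ((a :: b :: t).length : Int) ≤ 2 := by omega
          have : (a :: b :: t).length ≤ 2 := by exact_mod_cast this
          simp at this ⊢
          omega
        simpa using h3
      subst ht
      rw [if_neg h2]
      simp only [go]
      by_cases hab : a = b <;> simp [hab, lastInd] at hlastInd ⊢

-- ===== VERDICT (by name: the statement is the Claim_ definition above) =====
theorem get_repeat_count_spec : Claim_equal_get_repeat_count := by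
  intro seq _
  unfold Spec_get_repeat_count
  exact port_eq seq
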